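-- pv_equiv track=rewrite | github.com/e555321e/Clade | backend/app/services/species/hybridization.py | _generate_hybrid_code
-- ===== SOURCE A (Python) =====
-- def _generate_hybrid_code(parent_code: str, existing_codes: set[str]) -> str:
--     """生成杂交种的编码
--
--     【v2】使用格式: 主亲本编码 + h + 数字
--     例如: A1h1, A1h2, B1h1（挂在主亲本下）
--
--     Args:
--         parent_code: 主亲本的lineage_code
--         existing_codes: 已存在的编码集合
--     """
--     if not parent_code:
--         # 无主亲本时（理论上不应发生），使用H作为基础
--         parent_code = "H"
--
--     # 尝试生成唯一编码
--     idx = 1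
--     while True:
--         hybrid_code = f"{parent_code}h{idx}"
--         if hybrid_code not in existing_codes:
--             return hybrid_code
--         idx += 1
-- ===== SOURCE B (Python) =====
-- def _parse_index(s):
--     """Validate-and-parse a canonical positive decimal suffix (nonempty,
--     digits only, no leading zero) in one manual Horner scan; None otherwise."""
--     if not s or s[0] == "0":
--         return None
--     v = 0
--     for ch in s:
--         if not ("0" <= ch <= "9"):
--             return None
--         v = v * 10 + (ord(ch) - 48)
--     return v
--
--
-- def _generate_hybrid_code(parent_code: str, existing_codes: set[str]) -> str:
--     """Collect the numeric indices already used under this parent, then take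
--     the mex by scanning the sorted index list — no candidate-string probing."""
--     if not parent_code:
--         parent_code = "H"
--     prefix = parent_code + "h"
--     used = set()
--     for code in existing_codes:
--         if code.startswith(prefix):
--             v = _parse_index(code[len(prefix):])
--             if v is not None:
--                 used.add(v)
--     idx = 1
--     for v in sorted(used):
--         if v != idx:
--             break
--         idx += 1
--     return f"{prefix}{idx}"
-- ===== Notes on version B (the rewrite author's own statement) =====
-- stated objective: alternative
-- what changed: B never probes candidate codes: one pass validates-and-parses each code's suffix into an integer index set (manual Horner scan rejecting non-canonical forms), and the answer index is the mex obtained by a single scan over the sorted used indices, instead of A's unbounded loop formatting prefix+h+idx and testing membership in the whole collection.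
import Mathlib
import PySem

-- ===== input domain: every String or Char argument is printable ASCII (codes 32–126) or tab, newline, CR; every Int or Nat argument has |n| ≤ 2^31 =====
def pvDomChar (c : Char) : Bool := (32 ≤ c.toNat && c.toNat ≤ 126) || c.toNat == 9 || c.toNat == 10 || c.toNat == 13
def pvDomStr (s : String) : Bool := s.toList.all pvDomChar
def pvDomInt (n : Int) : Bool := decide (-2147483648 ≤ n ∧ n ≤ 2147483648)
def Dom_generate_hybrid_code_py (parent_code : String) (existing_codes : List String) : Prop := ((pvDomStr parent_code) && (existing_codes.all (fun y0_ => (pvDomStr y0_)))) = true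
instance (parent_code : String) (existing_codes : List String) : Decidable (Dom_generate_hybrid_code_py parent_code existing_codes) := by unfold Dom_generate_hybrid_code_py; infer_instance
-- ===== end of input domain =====

-- B replaces A's unbounded probe loop (format prefix+h+idx, test membership in the
-- whole collection, increment) by a different algorithm: one validate-and-parse pass
-- collects the integer indices already used under the parent, and the answer index
-- is the mex found by a single scan over the SORTED used indices (objective:
-- alternative; no candidate-string probing).

-- ===== PORT A =====
-- A's 'while True' loop, made total with fuel. Fuel (number of codes + 1) always
-- suffices (proved below via pigeonhole: the probed candidates are pairwise distinct
-- strings, so one of the first length+1 is free); the fuel-0 branch is unreachable.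
def pyA_loop (pref : List Char) (codes : List String) : Nat → Nat → String
  | 0, _ => ""
  | fuel+1, idx =>
      -- hybrid_code = f"{parent_code}h{idx}"
      let hybrid_code := String.ofList (pref ++ PySem.Int.toChars (idx : Int))
      if hybrid_code ∈ codes then pyA_loop pref codes fuel (idx + 1)
      else hybrid_code

def generate_hybrid_code_py (parent_code : String) (existing_codes : List String) : String :=
  let p := if parent_code = "" then "H" else parent_code   -- if not parent_code: parent_code = "H"
  pyA_loop (p.toList ++ ['h']) existing_codes (existing_codes.length + 1) 1

-- ===== PORT B =====
-- _parse_index's Horner loop with its per-character digit check (early 'return None' = none)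
def pyParseGo : List Char → Nat → Option Nat
  | [], v => some v
  | c :: cs, v =>
      if '0' ≤ c ∧ c ≤ '9' then pyParseGo cs (v * 10 + (c.toNat - 48))
      else none

-- def _parse_index(s): 'if not s or s[0] == "0": return None' then the Horner scan
def pyParseIndex (s : List Char) : Option Nat :=
  if s = [] ∨ s.headD ' ' = '0' then none else pyParseGo s 0

-- 'for code in existing_codes: if code.startswith(prefix): v = _parse_index(code[len(prefix):]); if v is not None: used.add(v)'
def pyB_used (pref : List Char) (codes : List String) : PySem.Set Nat :=
  codes.foldl (fun u c =>
    if PySem.Chars.startswith c.toList pref then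
      match pyParseIndex (c.toList.drop pref.length) with
      | some v => PySem.Set.add u v
      | none => u
    else u) []

-- 'idx = 1; for v in sorted(used): if v != idx: break; idx += 1'
def pyB_scan : List Nat → Nat → Nat
  | [], idx => idx
  | v :: vs, idx => if v ≠ idx then idx else pyB_scan vs (idx + 1)

def generate_hybrid_code_py_alt (parent_code : String) (existing_codes : List String) : String :=
  let p := if parent_code = "" then "H" else parent_code
  let pref := p.toList ++ ['h']
  let used := pyB_used pref existing_codes
  let idx := pyB_scan (PySem.List.sorted used (fun x => x) false) 1
  String.ofList (pref ++ PySem.Int.toChars (idx : Int))   -- f"{prefix}{idx}"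

-- ===== PRECONDITION & SPEC =====
def Spec_generate_hybrid_code_py (parent_code : String) (existing_codes : List String) (out : String) : Prop := out = generate_hybrid_code_py_alt parent_code existing_codes
instance (parent_code : String) (existing_codes : List String) (out : String) : Decidable (Spec_generate_hybrid_code_py parent_code existing_codes out) := by unfold Spec_generate_hybrid_code_py; infer_instance

-- ===== CLAIM (what is proved, stated in full; the proofs are below) =====
def Claim_equal_generate_hybrid_code_py : Prop := ∀ (parent_code : String) (existing_codes : List String), Dom_generate_hybrid_code_py parent_code existing_codes → Spec_generate_hybrid_code_py parent_code existing_codes (generate_hybrid_code_py parent_code existing_codes)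

-- ===== LEMMAS AND PROOFS =====

-- ---- decimal-string facts: B's manual parser inverts str(n) on canonical suffixes ----

theorem char_toNat_inj {c d : Char} (h : c.toNat = d.toNat) : c = d :=
  Char.ext (UInt32.toNat_inj.mp h)

theorem digit_toNat {c : Char} (h : '0' ≤ c ∧ c ≤ '9') : 48 ≤ c.toNat ∧ c.toNat ≤ 57 := by
  obtain ⟨h1, h2⟩ := h
  rw [Char.le_def] at h1 h2
  exact ⟨h1, h2⟩

theorem digitChar_of_digit {c : Char} (h : '0' ≤ c ∧ c ≤ '9') :
    Nat.digitChar (c.toNat - 48) = c := by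
  obtain ⟨h1, h2⟩ := digit_toNat h
  apply char_toNat_inj
  interval_cases h : c.toNat <;> rfl

theorem digitChar_digit {d : Nat} (h : d < 10) :
    ('0' ≤ Nat.digitChar d ∧ Nat.digitChar d ≤ '9') ∧ (Nat.digitChar d).toNat = d + 48 := by
  interval_cases d <;> exact ⟨⟨by decide, by decide⟩, by decide⟩

theorem go_eq_some_iff (s : List Char) (v w : Nat) :
    pyParseGo s v = some w ↔
      (∀ c ∈ s, '0' ≤ c ∧ c ≤ '9') ∧ w = s.foldl (fun v c => v * 10 + (c.toNat - 48)) v := by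
  induction s generalizing v with
  | nil => simp [pyParseGo, eq_comm]
  | cons c cs ih =>
    simp only [pyParseGo, List.foldl_cons, List.mem_cons]
    split
    · rename_i hc
      rw [ih]
      constructor
      · rintro ⟨hd, hw⟩
        exact ⟨fun x hx => hx.elim (fun e => e ▸ hc) (hd x), hw⟩
      · rintro ⟨hd, hw⟩
        exact ⟨fun x hx => hd x (Or.inr hx), hw⟩
    · rename_i hc
      constructor
      · rintro ⟨⟩
      · rintro ⟨hd, -⟩
        exact absurd (hd c (Or.inl rfl)) hc

theorem go_append (a : List Char) (c : Char) : ∀ v : Nat,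
    pyParseGo (a ++ [c]) v = (pyParseGo a v).bind (fun w => pyParseGo [c] w) := by
  induction a with
  | nil => intro v; simp [pyParseGo]
  | cons x xs ihx =>
    intro v
    simp only [List.cons_append, pyParseGo]
    split
    · exact ihx _
    · rfl

theorem go_toDigits (m : Nat) : ∀ v, pyParseGo (Nat.toDigits 10 m) v
    = some (v * 10 ^ (Nat.toDigits 10 m).length + m) := by
  induction m using Nat.strong_induction_on with
  | _ m ih =>
    intro v
    rw [Nat.toDigits_eq_if (by omega)]
    split
    · rename_i hm
      obtain ⟨hd, ht⟩ := digitChar_digit hm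
      simp [pyParseGo, hd, ht]
    · rename_i hm
      have hq : m / 10 < m := Nat.div_lt_self (by omega) (by omega)
      rw [go_append, ih _ hq v]
      obtain ⟨hd, ht⟩ := digitChar_digit (Nat.mod_lt m (by omega) : m % 10 < 10)
      simp only [Option.bind_some, pyParseGo, hd, List.length_append,
        List.length_cons, List.length_nil, ht, pow_succ]
      have h1 : (v * 10 ^ (Nat.toDigits 10 (m / 10)).length + m / 10) * 10 + (m % 10 + 48 - 48)
          = v * (10 ^ (Nat.toDigits 10 (m / 10)).length * 10) + (m / 10 * 10 + m % 10) := by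
        ring_nf; omega
      rw [h1]
      simp only [true_and, if_true]
      congr 1
      omega

theorem toDigits_head_ne_zero (m : Nat) (hm : 1 ≤ m) :
    ∃ c cs, Nat.toDigits 10 m = c :: cs ∧ c ≠ '0' := by
  induction m using Nat.strong_induction_on with
  | _ m ih =>
    rw [Nat.toDigits_eq_if (by omega)]
    split
    · rename_i h
      refine ⟨Nat.digitChar m, [], rfl, ?_⟩
      interval_cases m <;> decide
    · rename_i h
      obtain ⟨c, cs, hc, hne⟩ := ih (m / 10) (Nat.div_lt_self (by omega) (by omega))
        (Nat.one_le_div_iff (by omega) |>.mpr (by omega))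
      exact ⟨c, cs ++ [Nat.digitChar (m % 10)], by rw [hc]; rfl, hne⟩

theorem parse_roundtrip (m : Nat) (hm : 1 ≤ m) :
    pyParseIndex (Nat.toDigits 10 m) = some m := by
  obtain ⟨c, cs, hc, hne⟩ := toDigits_head_ne_zero m hm
  rw [pyParseIndex, if_neg (by rw [hc]; simp [hne]), go_toDigits]
  simp

theorem hval_pos (t : List Char) (v : Nat) (hv : 1 ≤ v) :
    1 ≤ t.foldl (fun v c => v * 10 + (c.toNat - 48)) v := by
  induction t generalizing v with
  | nil => simpa using hv
  | cons c cs ih =>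
    rw [List.foldl_cons]
    refine ih _ ?_
    omega

theorem parse_canon (s : List Char) (m : Nat) (h : pyParseIndex s = some m) :
    s = Nat.toDigits 10 m ∧ 1 ≤ m := by
  induction s using List.reverseRecOn generalizing m with
  | nil => simp [pyParseIndex] at h
  | append_singleton s' c ihs =>
    rw [pyParseIndex] at h
    split at h
    · cases h
    · rename_i hcond
      have hhead := (not_or.mp hcond).2
      obtain ⟨hdig, hval⟩ := (go_eq_some_iff _ _ _).mp h
      rw [List.foldl_append, List.foldl_cons, List.foldl_nil] at hval
      have hcdig : '0' ≤ c ∧ c ≤ '9' := hdig c (by simp)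
      obtain ⟨hc48, hc57⟩ := digit_toNat hcdig
      cases s' with
      | nil =>
        simp only [List.foldl_nil] at hval
        have hcz : c ≠ '0' := by simpa using hhead
        have hc48' : c.toNat ≠ 48 := fun he => hcz (char_toNat_inj (he.trans rfl))
        have hm1 : 1 ≤ m := by omega
        have hm10 : m < 10 := by omega
        refine ⟨?_, hm1⟩
        have hmc : m = c.toNat - 48 := by omega
        rw [Nat.toDigits_of_lt_base hm10, hmc, digitChar_of_digit hcdig]
        rfl
      | cons a b =>
        have hanz : a ≠ '0' := by simpa using hhead
        have hadig : '0' ≤ a ∧ a ≤ '9' := hdig a (by simp)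
        obtain ⟨ha48, ha57⟩ := digit_toNat hadig
        have ha48' : a.toNat ≠ 48 := fun he => hanz (char_toNat_inj (he.trans rfl))
        have hq1 : 1 ≤ (a :: b).foldl (fun v c => v * 10 + (c.toNat - 48)) 0 := by
          rw [List.foldl_cons]
          exact hval_pos _ _ (by omega)
        set q := (a :: b).foldl (fun v c => v * 10 + (c.toNat - 48)) 0 with hqdef
        have hparse' : pyParseIndex (a :: b) = some q := by
          rw [pyParseIndex, if_neg (by simp [hanz])]
          exact (go_eq_some_iff _ _ _).mpr
            ⟨fun x hx => hdig x (by
              simp only [List.mem_cons, List.mem_append] at hx ⊢; tauto), rfl⟩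
        obtain ⟨hs'eq, -⟩ := ihs q hparse'
        have hd10 : c.toNat - 48 < 10 := by omega
        have hm10 : 10 ≤ m := by omega
        refine ⟨?_, by omega⟩
        rw [Nat.toDigits_of_base_le (by omega) hm10]
        have hdiv : m / 10 = q := by omega
        have hmod : m % 10 = c.toNat - 48 := by omega
        rw [hdiv, hmod, ← hs'eq, digitChar_of_digit hcdig]

-- ---- the candidate string f"{parent}h{m}" (pref already carries the 'h') ----
def candAt (pref : List Char) (m : Nat) : String := String.ofList (pref ++ Nat.toDigits 10 m)

theorem toChars_natCast (m : Nat) : PySem.Int.toChars (m : Int) = Nat.toDigits 10 m := by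
  simp [PySem.Int.toChars]

theorem candAt_injOn (pref : List Char) {a b : Nat} (ha : 1 ≤ a) (hb : 1 ≤ b)
    (h : candAt pref a = candAt pref b) : a = b := by
  have h' : pref ++ Nat.toDigits 10 a = pref ++ Nat.toDigits 10 b := by
    have := congrArg String.toList h
    simpa [candAt, String.toList_ofList] using this
  have hd : Nat.toDigits 10 a = Nat.toDigits 10 b := List.append_cancel_left h'
  have h2 : pyParseIndex (Nat.toDigits 10 a) = some b := by rw [hd]; exact parse_roundtrip b hb
  have h3 := parse_roundtrip a ha
  rw [h2] at h3
  exact (Option.some_inj.mp h3).symm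

-- ---- B's index-collecting pass ----
theorem mem_pyB_used (pref : List Char) (codes : List String) (m : Nat) :
    m ∈ pyB_used pref codes ↔
      ∃ c ∈ codes, PySem.Chars.startswith c.toList pref = true ∧
        pyParseIndex (c.toList.drop pref.length) = some m := by
  have aux : ∀ (l : List String) (u : PySem.Set Nat),
      m ∈ l.foldl (fun u c =>
        if PySem.Chars.startswith c.toList pref then
          match pyParseIndex (c.toList.drop pref.length) with
          | some v => PySem.Set.add u v
          | none => u
        else u) u ↔
      m ∈ u ∨ ∃ c ∈ l, PySem.Chars.startswith c.toList pref = true ∧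
        pyParseIndex (c.toList.drop pref.length) = some m := by
    intro l
    induction l with
    | nil => simp
    | cons c cs ih =>
      intro u
      simp only [List.foldl_cons, ih, List.mem_cons]
      by_cases hs : PySem.Chars.startswith c.toList pref = true
      · rw [if_pos hs]
        rcases hp : pyParseIndex (c.toList.drop pref.length) with _ | v
        · constructor
          · rintro (hu | ⟨d, hd, h1, h2⟩)
            · exact Or.inl hu
            · exact Or.inr ⟨d, Or.inr hd, h1, h2⟩
          · rintro (hu | ⟨d, (rfl | hd), h1, h2⟩)
            · exact Or.inl hu
            · rw [hp] at h2; cases h2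
            · exact Or.inr ⟨d, hd, h1, h2⟩
        · rw [PySem.Set.mem_add]
          constructor
          · rintro ((hu | rfl) | ⟨d, hd, h1, h2⟩)
            · exact Or.inl hu
            · exact Or.inr ⟨c, Or.inl rfl, hs, hp⟩
            · exact Or.inr ⟨d, Or.inr hd, h1, h2⟩
          · rintro (hu | ⟨d, (rfl | hd), h1, h2⟩)
            · exact Or.inl (Or.inl hu)
            · rw [hp] at h2
              exact Or.inl (Or.inr (Option.some_inj.mp h2).symm)
            · exact Or.inr ⟨d, hd, h1, h2⟩
      · rw [if_neg hs]
        constructor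
        · rintro (hu | ⟨d, hd, h1, h2⟩)
          · exact Or.inl hu
          · exact Or.inr ⟨d, Or.inr hd, h1, h2⟩
        · rintro (hu | ⟨d, (rfl | hd), h1, h2⟩)
          · exact Or.inl hu
          · exact absurd h1 hs
          · exact Or.inr ⟨d, hd, h1, h2⟩
  simpa using aux codes []

theorem mem_used_iff (pref : List Char) (codes : List String) (m : Nat) :
    m ∈ pyB_used pref codes ↔ 1 ≤ m ∧ candAt pref m ∈ codes := by
  rw [mem_pyB_used]
  constructor
  · rintro ⟨c, hc, hs, hp⟩
    obtain ⟨heq, hm⟩ := parse_canon _ _ hp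
    have hpre : pref <+: c.toList := (PySem.Chars.startswith_iff _ _).mp hs
    have hsplit : pref ++ c.toList.drop pref.length = c.toList := List.prefix_iff_eq_append.mp hpre
    have hceq : candAt pref m = c := by
      apply String.toList_inj.mp
      rw [candAt, String.toList_ofList, ← heq, hsplit]
    exact ⟨hm, hceq ▸ hc⟩
  · rintro ⟨hm, hc⟩
    refine ⟨candAt pref m, hc, ?_, ?_⟩
    · exact (PySem.Chars.startswith_iff _ _).mpr
        (by rw [candAt, String.toList_ofList]; exact List.prefix_append _ _)
    · rw [candAt, String.toList_ofList, List.drop_left]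
      exact parse_roundtrip m hm

theorem nodup_pyB_used (pref : List Char) (codes : List String) :
    (pyB_used pref codes).Nodup := by
  have aux : ∀ (l : List String) (u : PySem.Set Nat), u.Nodup →
      (l.foldl (fun u c =>
        if PySem.Chars.startswith c.toList pref then
          match pyParseIndex (c.toList.drop pref.length) with
          | some v => PySem.Set.add u v
          | none => u
        else u) u).Nodup := by
    intro l
    induction l with
    | nil => exact fun u hu => hu
    | cons c cs ih =>
      intro u hu
      rw [List.foldl_cons]
      apply ih
      split
      · split
        · exact PySem.Set.nodup_add _ _ hu
        · exact hu
      · exact hu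
  exact aux codes [] List.nodup_nil

-- ---- A's probe loop returns the first free candidate ----
theorem A_loop_spec (pref : List Char) (codes : List String) :
    ∀ (fuel idx : Nat), (∃ k, k < fuel ∧ candAt pref (idx + k) ∉ codes) →
      ∃ j, pyA_loop pref codes fuel idx = candAt pref (idx + j) ∧
        candAt pref (idx + j) ∉ codes ∧ ∀ i, i < j → candAt pref (idx + i) ∈ codes := by
  intro fuel
  induction fuel with
  | zero => rintro idx ⟨k, hk, -⟩; omega
  | succ n ih =>
    rintro idx ⟨k, hk, hfree⟩
    simp only [pyA_loop]
    rw [toChars_natCast,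
      show String.ofList (pref ++ Nat.toDigits 10 idx) = candAt pref idx from rfl]
    by_cases hin : candAt pref idx ∈ codes
    · rw [if_pos hin]
      have hk0 : k ≠ 0 := by rintro rfl; simp at hfree; exact hfree hin
      obtain ⟨j, h1, h2, h3⟩ := ih (idx + 1)
        ⟨k - 1, by omega, by rw [show idx + 1 + (k - 1) = idx + k by omega]; exact hfree⟩
      refine ⟨j + 1, ?_, ?_, ?_⟩
      · rw [h1, show idx + 1 + j = idx + (j + 1) by omega]
      · rw [show idx + (j + 1) = idx + 1 + j by omega]; exact h2
      · intro i hi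
        rcases Nat.eq_zero_or_pos i with rfl | hpos
        · simpa using hin
        · rw [show idx + i = idx + 1 + (i - 1) by omega]
          exact h3 _ (by omega)
    · rw [if_neg hin]
      exact ⟨0, by simp [candAt], by simpa using hin, by omega⟩

-- ---- fuel sufficiency: among the first length+1 candidates one is free ----
theorem pigeonhole (pref : List Char) (codes : List String) :
    ∃ k, k < codes.length + 1 ∧ candAt pref (1 + k) ∉ codes := by
  by_contra hno
  have hall : ∀ k, k < codes.length + 1 → candAt pref (1 + k) ∈ codes := by
    intro k hk
    by_contra hfree
    exact hno ⟨k, hk, hfree⟩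
  set L := (List.range (codes.length + 1)).map (fun k => candAt pref (1 + k)) with hL
  have hnodup : L.Nodup := by
    refine List.Nodup.map_on ?_ (List.nodup_range)
    intro a ha b hb hab
    have := candAt_injOn pref (a := 1 + a) (b := 1 + b) (by omega) (by omega) hab
    omega
  have hsub : L ⊆ codes := by
    intro x hx
    rw [hL, List.mem_map] at hx
    obtain ⟨k, hk, rfl⟩ := hx
    exact hall k (List.mem_range.mp hk)
  have hlen : L.length ≤ codes.length := by
    classical
    calc L.length = L.toFinset.card := (List.toFinset_card_of_nodup hnodup).symm
      _ ≤ codes.toFinset.card := Finset.card_le_card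
          (by intro x hx; rw [List.mem_toFinset] at *; exact hsub hx)
      _ ≤ codes.length := codes.toFinset_card_le
  rw [hL] at hlen
  simp at hlen

-- ---- B's scan over the sorted used indices computes the least free index ----
theorem scan_spec : ∀ (l : List Nat) (idx : Nat), l.Pairwise (· < ·) → (∀ x ∈ l, idx ≤ x) →
    pyB_scan l idx ∉ l ∧ idx ≤ pyB_scan l idx ∧
      ∀ m, idx ≤ m → m < pyB_scan l idx → m ∈ l := by
  intro l
  induction l with
  | nil =>
    intro idx _ _
    simp only [pyB_scan]
    exact ⟨by simp, Nat.le_refl _, by omega⟩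
  | cons v vs ih =>
    intro idx hpw hge
    have hvlt : ∀ x ∈ vs, v < x := fun x hx => (List.pairwise_cons.mp hpw).1 x hx
    simp only [pyB_scan]
    by_cases hv : v = idx
    · rw [if_neg (by simp [hv])]
      obtain ⟨h1, h2, h3⟩ := ih (idx + 1) (List.pairwise_cons.mp hpw).2
        (fun x hx => by have := hvlt x hx; omega)
      refine ⟨?_, by omega, ?_⟩
      · simp only [List.mem_cons, not_or]
        exact ⟨by omega, h1⟩
      · intro m hm1 hm2
        rcases Nat.eq_or_lt_of_le hm1 with rfl | hlt
        · rw [hv]; exact List.mem_cons_self ..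
        · exact List.mem_cons_of_mem _ (h3 m (by omega) hm2)
    · rw [if_pos hv]
      have hvgt : idx < v := lt_of_le_of_ne (hge v (List.mem_cons_self ..)) (Ne.symm hv)
      refine ⟨?_, Nat.le_refl _, by omega⟩
      simp only [List.mem_cons, not_or]
      exact ⟨by omega, fun hmem => by have := hvlt _ hmem; omega⟩

-- ---- both programs return the first free candidate: the core equation ----
theorem core_eq (pref : List Char) (codes : List String) :
    pyA_loop pref codes (codes.length + 1) 1
      = String.ofList (pref ++ PySem.Int.toChars
          ((pyB_scan (PySem.List.sorted (pyB_used pref codes) (fun x => x) false) 1 : Nat) : Int)) := by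
  obtain ⟨k, hk, hfree⟩ := pigeonhole pref codes
  obtain ⟨j, hA1, hA2, hA3⟩ := A_loop_spec pref codes (codes.length + 1) 1 ⟨k, hk, hfree⟩
  set s := PySem.List.sorted (pyB_used pref codes) (fun x => x) false with hs
  have hperm : s.Perm (pyB_used pref codes) := PySem.List.sorted_perm _ _ _
  have hmem : ∀ x, x ∈ s ↔ (1 ≤ x ∧ candAt pref x ∈ codes) :=
    fun x => hperm.mem_iff.trans (mem_used_iff pref codes x)
  have hnodup : s.Nodup := hperm.nodup_iff.mpr (nodup_pyB_used pref codes)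
  have hle : s.Pairwise (· ≤ ·) := by
    simpa using PySem.List.sorted_pairwise (pyB_used pref codes) (fun x => x)
  have hlt : s.Pairwise (· < ·) :=
    (hle.and hnodup).imp (fun h => lt_of_le_of_ne h.1 h.2)
  have hge1 : ∀ x ∈ s, 1 ≤ x := fun x hx => ((hmem x).mp hx).1
  obtain ⟨hB1, hB2, hB3⟩ := scan_spec s 1 hlt hge1
  set r := pyB_scan s 1 with hr
  have hrfree : candAt pref r ∉ codes := fun hc => hB1 ((hmem r).mpr ⟨hB2, hc⟩)
  have hbelow : ∀ m, 1 ≤ m → m < r → candAt pref m ∈ codes :=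
    fun m h1 h2 => ((hmem m).mp (hB3 m h1 h2)).2
  have hJR : 1 + j = r := by
    rcases Nat.lt_trichotomy (1 + j) r with h | h | h
    · exact absurd (hbelow (1 + j) (by omega) h) hA2
    · exact h
    · have hmem' := hA3 (r - 1) (by omega)
      rw [show 1 + (r - 1) = r by omega] at hmem'
      exact absurd hmem' hrfree
  rw [hA1, toChars_natCast,
    show String.ofList (pref ++ Nat.toDigits 10 r) = candAt pref r from rfl, ← hJR]

-- ===== VERDICT (by name: the statement is the Claim_ definition above) =====
theorem generate_hybrid_code_py_spec : Claim_equal_generate_hybrid_code_py := by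
  intro parent_code existing_codes _
  unfold Spec_generate_hybrid_code_py generate_hybrid_code_py generate_hybrid_code_py_alt
  exact core_eq _ _
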